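-- pv_equiv track=rewrite | github.com/abartella02/3k04-lab | DCM_group11/helpers.py | checkInvalidChars
-- ===== SOURCE A (Python) =====
-- def checkInvalidChars(username):
--     invalidStrs = ['&', '=', '_', '+', ',', '<', '>',
--         '..', '/', '\\', '\'', '"', '$', '\#', '!',
--         '(', ')', '*', ':', ';', '@', '[', ']', '^',
--         '`', '{', '|', '}', '~']
--
--     for i in invalidStrs:
--         if i in username:
--             return False
--     return True
-- ===== SOURCE B (Python) =====
-- def checkInvalidChars(username):
--     # One pass over username against a set of forbidden characters, plus one '..' substring check.
--     invalid_chars = set('&=_+,<>/\\\'"$!()*:;@[]^`{|}~')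
--     return not any(c in invalid_chars for c in username) and '..' not in username
-- ===== Notes on version B (the rewrite author's own statement) =====
-- stated objective: idiomatic
-- what changed: Replaces the substring-by-substring scan of a 29-entry blacklist with a single pass over the username's characters against a character set, plus one '..' substring check (the redundant '\#' entry, already covered by '\', disappears).
import Mathlib
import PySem

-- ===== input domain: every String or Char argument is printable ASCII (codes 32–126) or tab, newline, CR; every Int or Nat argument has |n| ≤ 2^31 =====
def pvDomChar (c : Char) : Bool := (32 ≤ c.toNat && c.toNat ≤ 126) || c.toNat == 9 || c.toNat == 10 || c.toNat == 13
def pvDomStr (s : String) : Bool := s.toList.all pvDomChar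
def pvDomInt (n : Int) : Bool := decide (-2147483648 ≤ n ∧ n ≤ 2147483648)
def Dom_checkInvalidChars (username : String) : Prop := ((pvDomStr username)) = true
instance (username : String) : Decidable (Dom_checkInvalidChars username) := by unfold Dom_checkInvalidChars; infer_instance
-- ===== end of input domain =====

-- B replaces A's substring scan over a 29-entry blacklist by one pass over the username's
-- characters against a character set plus a single '..' substring check (idiomatic rewrite).


-- ===== PORT A =====
-- A's blacklist, in source order ('\#' is Python's literal two characters backslash-'#')
def pvInvalidStrs : List String :=
  ["&", "=", "_", "+", ",", "<", ">",
   "..", "/", "\\", "'", "\"", "$", "\\#", "!",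
   "(", ")", "*", ":", ";", "@", "[", "]", "^",
   "`", "{", "|", "}", "~"]

-- A's for-loop with early return False
def pvGoA (strs : List String) (username : String) : Bool :=
  match strs with
  | [] => true
  | i :: rest => if PySem.Str.isIn i username then false else pvGoA rest username

def checkInvalidChars (username : String) : Bool :=
  pvGoA pvInvalidStrs username

-- ===== PORT B =====
-- B's set of forbidden single characters (set('&=_+,<>/\\'"$!()*:;@[]^`{|}~'))
def pvInvalidChars : List Char :=
  ['&', '=', '_', '+', ',', '<', '>', '/', '\\', '\'', '"', '$', '!',
   '(', ')', '*', ':', ';', '@', '[', ']', '^', '`', '{', '|', '}', '~']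

def checkInvalidChars_alt (username : String) : Bool :=
  !(username.toList.any (fun c => pvInvalidChars.contains c)) && !(PySem.Str.isIn ".." username)

-- ===== PRECONDITION & SPEC =====
def Spec_checkInvalidChars (username : String) (out : Bool) : Prop := out = checkInvalidChars_alt username
instance (username : String) (out : Bool) : Decidable (Spec_checkInvalidChars username out) := by unfold Spec_checkInvalidChars; infer_instance

-- ===== CLAIM (what is proved, stated in full; the proofs are below) =====
def Claim_equal_checkInvalidChars : Prop := ∀ (username : String), Dom_checkInvalidChars username → Spec_checkInvalidChars username (checkInvalidChars username)

-- ===== LEMMAS AND PROOFS =====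

-- A's early-return loop is the conjunction of 'blacklist entry not in username'
theorem pvGoA_eq_all (strs : List String) (u : String) :
    pvGoA strs u = strs.all (fun i => !(PySem.Str.isIn i u)) := by
  induction strs with
  | nil => rfl
  | cons i rest ih =>
    by_cases h : PySem.Chars.isIn i.toList u.toList
    · simp [pvGoA, h]
    · simp [pvGoA, h, ih]

-- a single-character substring test is a character-membership test
theorem pvIsIn_singleton (c : Char) (l : List Char) :
    PySem.Chars.isIn [c] l = l.contains c := by
  rcases h : PySem.Chars.isIn [c] l with _|_
  · rw [PySem.Chars.isIn_eq_false_iff] at h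
    simp [List.singleton_infix_iff] at h
    simp [h]
  · rw [PySem.Chars.isIn_iff_infix] at h
    simp [List.singleton_infix_iff] at h
    simp [h]

-- the '\#' blacklist entry is redundant: no backslash character means no '\#' substring
theorem pvNoBackslashHash (l : List Char) (h : l.contains '\\' = false) :
    PySem.Chars.isIn ['\\', '#'] l = false := by
  rw [PySem.Chars.isIn_eq_false_iff]
  intro hinf
  have := hinf.subset (List.mem_cons_self)
  simp_all

-- scanning the username against the set equals scanning the set against the username
theorem pvAnyComm (l X : List Char) :
    l.any (fun c => X.contains c) = X.any (fun c => l.contains c) := by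
  rw [← Bool.coe_iff_coe]; simp [List.any_eq_true]; tauto

-- ===== VERDICT (by name: the statement is the Claim_ definition above) =====
theorem checkInvalidChars_spec : Claim_equal_checkInvalidChars := by
  intro s _
  unfold Spec_checkInvalidChars checkInvalidChars checkInvalidChars_alt
  rw [pvGoA_eq_all, pvAnyComm]
  by_cases hbs : '\\' ∈ s.toList
  · simp [pvInvalidStrs, pvInvalidChars, PySem.Str.isIn_eq, pvIsIn_singleton, hbs]
  · have hbs' : s.toList.contains '\\' = false := by simpa using hbs
    simp [pvInvalidStrs, pvInvalidChars, PySem.Str.isIn_eq, pvIsIn_singleton,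
      pvNoBackslashHash _ hbs']
    rw [← Bool.coe_iff_coe]
    simp only [Bool.and_eq_true, Bool.not_eq_true', decide_eq_false_iff_not]
    tauto
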